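-- pv_equiv track=rewrite | github.com/mmetsa/PythonProjects | pr04_filter/filter.py | longest_filtered_word
-- ===== SOURCE A (Python) =====
-- def remove_vowels(string: str) -> str:
--     """
--     Remove vowels (a, e, i, o, u).
--
--     :param string: Input string
--     :return string without vowels.
--     """
--     vowels = ['a', 'e', 'i', 'o', 'u', 'A', 'E', 'I', 'O', 'U']
--     for a in string:
--         if a in vowels:
--             string = string.replace(a, '')
--     return string
--
-- def longest_filtered_word(string_list: list) -> str:
--     """
--     Filter, find and return the longest string.
--
--     Return None if list is empty.
--
--     :param string_list: List of strings.
--     :return: Longest string without vowels.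
--     """
--     if len(string_list) == 0:
--         return None
--     longest_word = ""
--     for a in string_list:
--         a = remove_vowels(a)
--         if len(longest_word) < len(a):
--             longest_word = a
--     return longest_word
-- ===== SOURCE B (Python) =====
-- def remove_vowels(string: str) -> str:
--     """Remove vowels in one pass over the characters."""
--     return ''.join(c for c in string if c not in "aeiouAEIOU")
--
--
-- def longest_filtered_word(string_list: list) -> str:
--     """Filter every word, then take the head of a stable descending sort by length.
--
--     Stability of sorted() keeps the first-occurring word on length ties,
--     matching the manual running-max scan.
--     """
--     if len(string_list) == 0:
--         return None
--     filtered = [remove_vowels(w) for w in string_list]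
--     return sorted(filtered, key=len, reverse=True)[0]
-- ===== Notes on version B (the rewrite author's own statement) =====
-- stated objective: alternative
-- what changed: remove_vowels becomes a single-pass character filter instead of repeated str.replace calls, and the longest word is picked as the head of a stable descending sort by length instead of a manual running-max loop.
import Mathlib
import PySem

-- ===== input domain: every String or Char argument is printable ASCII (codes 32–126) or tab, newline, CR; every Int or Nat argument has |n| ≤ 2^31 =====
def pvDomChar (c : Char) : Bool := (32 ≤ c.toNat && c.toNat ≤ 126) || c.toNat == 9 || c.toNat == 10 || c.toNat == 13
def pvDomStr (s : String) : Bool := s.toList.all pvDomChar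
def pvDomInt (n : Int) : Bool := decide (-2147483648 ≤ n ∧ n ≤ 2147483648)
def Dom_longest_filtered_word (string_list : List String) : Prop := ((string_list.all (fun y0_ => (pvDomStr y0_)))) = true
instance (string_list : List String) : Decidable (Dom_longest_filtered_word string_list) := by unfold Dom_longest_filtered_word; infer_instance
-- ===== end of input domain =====

-- B removes vowels in one character pass (instead of repeated str.replace) and picks the
-- longest filtered word as the head of a stable descending sort by length (instead of a
-- manual running-max loop); objective: alternative algorithm, return value unchanged.

-- ===== PORT A =====
-- for a in string: if a in vowels: string = string.replace(a, '')   (iterates the ORIGINAL string)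
def remove_vowels (string : String) : String :=
  string.toList.foldl (fun cur a =>
    if ['a','e','i','o','u','A','E','I','O','U'].contains a then
      PySem.Str.replace cur (String.ofList [a]) ""
    else cur) string

def longest_filtered_word (string_list : List String) : Option String :=
  if string_list.length = 0 then none
  else some (string_list.foldl (fun longest_word a =>
    let a' := remove_vowels a
    if PySem.Str.len longest_word < PySem.Str.len a' then a' else longest_word) "")

-- ===== PORT B =====
-- `c not in "aeiouAEIOU"` on the single character c is membership of that code point:
-- ported as List.contains over the pattern's characters (exact on all inputs).
def remove_vowels_alt (string : String) : String :=
  String.ofList (string.toList.filter (fun c => !("aeiouAEIOU".toList.contains c)))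

def longest_filtered_word_alt (string_list : List String) : Option String :=
  if string_list.length = 0 then none
  else
    PySem.List.pyGet?
      (PySem.List.sorted (string_list.map remove_vowels_alt) (fun w => PySem.Str.len w) true) 0

-- ===== PRECONDITION & SPEC =====
def Spec_longest_filtered_word (string_list : List String) (out : Option String) : Prop := out = longest_filtered_word_alt string_list
instance (string_list : List String) (out : Option String) : Decidable (Spec_longest_filtered_word string_list out) := by unfold Spec_longest_filtered_word; infer_instance

-- ===== CLAIM (what is proved, stated in full; the proofs are below) =====
def Claim_equal_longest_filtered_word : Prop := ∀ (string_list : List String), Dom_longest_filtered_word string_list → Spec_longest_filtered_word string_list (longest_filtered_word string_list)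

-- ===== LEMMAS AND PROOFS =====

-- str.replace with a single-character pattern and empty replacement is a character filter.
theorem replace_go_single (a : Char) (l : List Char) (fuel : Nat) (acc : List Char)
    (h : l.length ≤ fuel) :
    PySem.Chars.replace.go [a] [] fuel l acc = acc.reverse ++ l.filter (fun c => c != a) := by
  induction l generalizing fuel acc with
  | nil =>
    cases fuel <;> simp [PySem.Chars.replace.go]
  | cons c t ih =>
    cases fuel with
    | zero => simp at h
    | succ fuel =>
      have hle : t.length ≤ fuel := by simp at h; omega
      by_cases hc : c = a
      · subst hc
        have hrec := ih fuel acc hle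
        simp [PySem.Chars.replace.go, List.isPrefixOf, hrec]
      · have hrec := ih fuel (c :: acc) hle
        simp [PySem.Chars.replace.go, List.isPrefixOf, hc, hrec, bne]
        simp [Ne.symm hc]

theorem replace_single (cs : List Char) (a : Char) :
    PySem.Chars.replace cs [a] [] = cs.filter (fun c => c != a) := by
  simpa [PySem.Chars.replace] using replace_go_single a cs cs.length [] le_rfl

theorem str_replace_single (t : String) (a : Char) :
    (PySem.Str.replace t (String.ofList [a]) "").toList = t.toList.filter (fun c => c != a) := by
  simpa [PySem.Str.toList_replace] using replace_single t.toList a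

-- The replace loop of A, run over any character list covering t's vowels, filters t.
theorem rv_loop_filter (cs : List Char) (t : String)
    (h : ∀ c ∈ t.toList, (['a','e','i','o','u','A','E','I','O','U'].contains c) = true → c ∈ cs) :
    (cs.foldl (fun cur a =>
      if ['a','e','i','o','u','A','E','I','O','U'].contains a then
        PySem.Str.replace cur (String.ofList [a]) ""
      else cur) t).toList
    = t.toList.filter (fun c => !(['a','e','i','o','u','A','E','I','O','U'].contains c)) := by
  induction cs generalizing t with
  | nil =>
    simp only [List.foldl_nil]
    refine (List.filter_eq_self.mpr ?_).symm
    intro c hc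
    by_contra hv
    have hvc : (['a','e','i','o','u','A','E','I','O','U'].contains c) = true := by
      cases hcc : ['a','e','i','o','u','A','E','I','O','U'].contains c
      · exact absurd (by rw [hcc]; rfl) hv
      · rfl
    have := h c hc hvc
    simp at this
  | cons a cs ih =>
    by_cases ha : (['a','e','i','o','u','A','E','I','O','U'].contains a) = true
    · rw [List.foldl_cons, if_pos ha]
      rw [ih (PySem.Str.replace t (String.ofList [a]) "")
        (by
          intro c hc hv
          rw [str_replace_single] at hc
          rcases List.mem_filter.mp hc with ⟨hct, hne⟩
          rcases h c hct hv with hmem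
          rcases List.mem_cons.mp hmem with rfl | hcs
          · simp at hne
          · exact hcs)]
      rw [str_replace_single, List.filter_filter]
      apply List.filter_congr
      intro c _
      by_cases hv : (['a','e','i','o','u','A','E','I','O','U'].contains c) = true
      · rw [hv]; simp
      · rw [Bool.not_eq_true] at hv
        have hca : c ≠ a := by rintro rfl; rw [ha] at hv; simp at hv
        rw [hv]; simp [hca]
    · rw [List.foldl_cons, if_neg ha]
      apply ih
      intro c hc hv
      have : c ≠ a := by rintro rfl; exact ha hv
      rcases List.mem_cons.mp (h c hc hv) with rfl | hcs
      · exact absurd rfl this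
      · exact hcs

theorem rv_eq (s : String) : remove_vowels s = remove_vowels_alt s := by
  apply String.toList_inj.mp
  rw [remove_vowels, rv_loop_filter s.toList s (fun c hc _ => hc)]
  have hv : ("aeiouAEIOU".toList) = ['a','e','i','o','u','A','E','I','O','U'] := by decide
  simp [remove_vowels_alt, hv]

-- Head of the insertion accumulator of the stable reverse sort = running strict max.
theorem insert_head (xs : List String) (h : String) (t : List String) :
    (xs.foldl (fun acc x =>
        PySem.List.insertBy (fun a b => decide (PySem.Str.len b < PySem.Str.len a)) x acc)
      (h :: t)).head?
    = some (xs.foldl (fun m x => if PySem.Str.len m < PySem.Str.len x then x else m) h) := by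
  induction xs generalizing h t with
  | nil => simp
  | cons x xs ih =>
    by_cases hx : PySem.Str.len h < PySem.Str.len x
    · simp only [List.foldl_cons, PySem.List.insertBy, hx, decide_true, if_pos]
      exact ih x (h :: t)
    · simp only [List.foldl_cons, PySem.List.insertBy, hx, decide_false, Bool.false_eq_true]
      exact ih h _

theorem empty_of_len_nonpos (m : String) (h : ¬ 0 < PySem.Str.len m) : m = "" := by
  rw [PySem.Str.len_eq] at h
  have : m.toList = [] := by
    cases hm : m.toList with
    | nil => rfl
    | cons c cs => rw [hm] at h; simp at h
  exact String.toList_inj.mp (by simpa using this)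

-- ===== VERDICT (by name: the statement is the Claim_ definition above) =====
theorem longest_filtered_word_spec : Claim_equal_longest_filtered_word := by
  intro string_list _
  unfold Spec_longest_filtered_word longest_filtered_word longest_filtered_word_alt
  cases string_list with
  | nil => simp
  | cons w ws =>
    simp only [List.length_cons, Nat.succ_ne_zero, List.map_cons]
    have hmap : ∀ l : List String,
        l.foldl (fun longest_word a =>
          let a' := remove_vowels a
          if PySem.Str.len longest_word < PySem.Str.len a' then a' else longest_word) ""
        = (l.map remove_vowels_alt).foldl
            (fun m x => if PySem.Str.len m < PySem.Str.len x then x else m) "" := by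
      intro l
      rw [List.foldl_map]
      simp only [funext rv_eq]
    rw [hmap, List.map_cons, List.foldl_cons,
      PySem.List.sorted_rev_eq_foldl_insertBy, List.foldl_cons]
    have hins : PySem.List.insertBy
        (fun a b => decide (PySem.Str.len b < PySem.Str.len a)) (remove_vowels_alt w) [] =
        [remove_vowels_alt w] := rfl
    rw [hins, PySem.List.pyGet?_zero, ← List.head?_eq_getElem?,
      insert_head (ws.map remove_vowels_alt) (remove_vowels_alt w) []]
    by_cases h0 : PySem.Str.len "" < PySem.Str.len (remove_vowels_alt w)
    · rw [if_pos h0]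
    · rw [if_neg h0]
      have : PySem.Str.len "" = 0 := by decide
      rw [empty_of_len_nonpos (remove_vowels_alt w) (by rw [this] at h0; exact h0)]
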